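-- pv_equiv track=rewrite | github.com/phy0x1a79ed/MetasmithLibraries | results/generate_report.py | parse_sample_label
-- ===== SOURCE A (Python) =====
-- PE_PREFIX = "161-PE"
--
-- CONDITIONS = ["8", "P", "S"]
--
-- TIMEPOINTS = [24, 72, 144]
--
-- def parse_sample_label(short_groupname):
--     """Extract condition and timepoint from short groupname like POS_161-PE-8-24h."""
--     s = short_groupname.upper()
--     if PE_PREFIX.upper() not in s:
--         return None, None
--     # strip polarity prefix
--     after = s.split(PE_PREFIX.upper() + "-", 1)[-1]  # e.g. "8-24H", "0H", "P-72H"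
--     if after.startswith("0H"):
--         return "0h", 0
--     for cond in CONDITIONS:
--         if after.startswith(cond.upper() + "-"):
--             rest = after[len(cond) + 1:]  # e.g. "24H"
--             for tp in TIMEPOINTS:
--                 if rest.startswith(f"{tp}H"):
--                     return cond, tp
--     return None, None
-- ===== SOURCE B (Python) =====
-- PE_PREFIX = "161-PE"
--
-- # Table-driven: one flat scan over precomputed label prefixes replaces the
-- # special case + nested condition/timepoint loops.
-- _TABLE = [("0H", ("0h", 0))] + [
--     ("%s-%dH" % (c, t), (c, t)) for c in ("8", "P", "S") for t in (24, 72, 144)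
-- ]
--
-- def parse_sample_label(short_groupname):
--     s = short_groupname.upper()
--     if PE_PREFIX not in s:
--         return None, None
--     after = s.split(PE_PREFIX + "-", 1)[-1]
--     for key, val in _TABLE:
--         if after.startswith(key):
--             return val
--     return None, None
-- ===== Notes on version B (the rewrite author's own statement) =====
-- stated objective: simpler
-- what changed: The 0h special case and the nested CONDITIONS x TIMEPOINTS startswith loops are replaced by a single flat scan over a precomputed prefix-to-result table built once at module load.
import Mathlib
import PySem

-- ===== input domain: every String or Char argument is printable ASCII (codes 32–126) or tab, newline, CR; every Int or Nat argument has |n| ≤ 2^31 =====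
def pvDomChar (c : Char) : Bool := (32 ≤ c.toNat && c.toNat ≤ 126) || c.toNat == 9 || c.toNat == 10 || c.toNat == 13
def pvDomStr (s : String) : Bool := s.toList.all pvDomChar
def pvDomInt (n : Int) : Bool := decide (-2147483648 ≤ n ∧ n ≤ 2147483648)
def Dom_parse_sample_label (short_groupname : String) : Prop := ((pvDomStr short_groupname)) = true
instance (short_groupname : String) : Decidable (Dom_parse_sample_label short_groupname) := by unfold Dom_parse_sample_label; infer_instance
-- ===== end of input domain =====

-- B replaces the 0h special case plus the nested CONDITIONS×TIMEPOINTS startswith loops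
-- by one flat scan over a precomputed prefix→result table (objective: simpler/alternative).

-- ===== PORT A =====
-- module constant PE_PREFIX
def pslPePrefix : String := "161-PE"
-- module constant CONDITIONS
def pslConditions : List String := ["8", "P", "S"]
-- module constant TIMEPOINTS
def pslTimepoints : List Int := [24, 72, 144]

-- inner 'for tp in TIMEPOINTS' loop; some = early return from the function
def pslTpLoop (cond : String) (rest : String) : List Int → Option (Option String × Option Int)
  | [] => none
  | tp :: tps =>
    if PySem.Str.startswith rest (PySem.Int.toStr tp ++ "H") then some (some cond, some tp)
    else pslTpLoop cond rest tps

-- outer 'for cond in CONDITIONS' loop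
def pslCondLoop (after : String) : List String → Option String × Option Int
  | [] => (none, none)
  | cond :: cs =>
    if PySem.Str.startswith after (PySem.Str.upper cond ++ "-") then
      match pslTpLoop cond (PySem.Str.slice after (some ((PySem.Str.len cond : Int) + 1)) none) pslTimepoints with
      | some r => r
      | none => pslCondLoop after cs
    else pslCondLoop after cs

def parse_sample_label (short_groupname : String) : Option String × Option Int :=
  let s := PySem.Str.upper short_groupname
  if PySem.Str.isIn (PySem.Str.upper pslPePrefix) s = false then (none, none)
  else
    -- s.split(PE_PREFIX.upper() + "-", 1)[-1]; split of a nonempty separator always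
    -- returns a nonempty list, so the [-1] index never raises and the getD defaults are dead
    let after := (PySem.List.pyGet? ((PySem.Str.splitMax? s (PySem.Str.upper pslPePrefix ++ "-") 1).getD []) (-1)).getD ""
    if PySem.Str.startswith after "0H" then (some "0h", some 0)
    else pslCondLoop after pslConditions

-- ===== PORT B =====
-- _TABLE: the precomputed prefix → result table (a list comprehension in Source B)
def pslTable : List (String × (Option String × Option Int)) :=
  ("0H", (some "0h", some 0)) ::
    (["8", "P", "S"].flatMap fun c =>
      [(24 : Int), 72, 144].map fun t => (c ++ "-" ++ PySem.Int.toStr t ++ "H", (some c, some t)))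

-- 'for key, val in _TABLE' scan
def pslTableScan (after : String) : List (String × (Option String × Option Int)) → Option String × Option Int
  | [] => (none, none)
  | (key, val) :: rest => if PySem.Str.startswith after key then val else pslTableScan after rest

def parse_sample_label_alt (short_groupname : String) : Option String × Option Int :=
  let s := PySem.Str.upper short_groupname
  if PySem.Str.isIn pslPePrefix s = false then (none, none)
  else
    let after := (PySem.List.pyGet? ((PySem.Str.splitMax? s (pslPePrefix ++ "-") 1).getD []) (-1)).getD ""
    pslTableScan after pslTable

-- ===== PRECONDITION & SPEC =====
def Spec_parse_sample_label (short_groupname : String) (out : Option String × Option Int) : Prop := out = parse_sample_label_alt short_groupname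
instance (short_groupname : String) (out : Option String × Option Int) : Decidable (Spec_parse_sample_label short_groupname out) := by unfold Spec_parse_sample_label; infer_instance

-- ===== CLAIM (what is proved, stated in full; the proofs are below) =====
def Claim_equal_parse_sample_label : Prop := ∀ (short_groupname : String), Dom_parse_sample_label short_groupname → Spec_parse_sample_label short_groupname (parse_sample_label short_groupname)

-- ===== LEMMAS AND PROOFS =====

-- s starts with p ++ q iff it starts with p and the remainder starts with q
lemma chars_startswith_append (l p q : List Char) :
    PySem.Chars.startswith l (p ++ q) =
      (PySem.Chars.startswith l p && PySem.Chars.startswith (l.drop p.length) q) := by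
  rw [Bool.eq_iff_iff]
  simp only [Bool.and_eq_true, PySem.Chars.startswith_iff]
  constructor
  · rintro ⟨t, ht⟩
    refine ⟨⟨q ++ t, by simpa using ht⟩, ⟨t, ?_⟩⟩
    rw [← ht]; simp
  · rintro ⟨⟨t1, h1⟩, ⟨t2, h2⟩⟩
    refine ⟨t2, ?_⟩
    rw [← h1] at h2 ⊢
    rw [List.drop_left] at h2
    rw [← h2]; simp


-- the post-split bodies of A and B agree on every string
set_option maxHeartbeats 4000000 in
lemma psl_body_eq (after : String) :
    (if PySem.Str.startswith after "0H" then ((some "0h", some 0) : Option String × Option Int)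
     else pslCondLoop after pslConditions) = pslTableScan after pslTable := by
  have htab : pslTable = [("0H", (some "0h", some 0)),
    ("8-24H", (some "8", some 24)), ("8-72H", (some "8", some 72)), ("8-144H", (some "8", some 144)),
    ("P-24H", (some "P", some 24)), ("P-72H", (some "P", some 72)), ("P-144H", (some "P", some 144)),
    ("S-24H", (some "S", some 24)), ("S-72H", (some "S", some 72)), ("S-144H", (some "S", some 144))] := by
    decide
  rw [htab]
  simp only [pslCondLoop, pslTpLoop, pslTableScan, pslConditions, pslTimepoints]
  have gen : ∀ (s p q : String), PySem.Str.startswith s (p ++ q) =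
      (PySem.Str.startswith s p &&
        PySem.Str.startswith (PySem.Str.slice s (some (p.toList.length : Int))) q) := by
    intro s p q
    simp [chars_startswith_append]
  have key : ∀ (s k p q : String), k = p ++ q → ((p.toList.length : Int)) = 2 →
      PySem.Str.startswith s k =
      (PySem.Str.startswith s p && PySem.Str.startswith (PySem.Str.slice s (some 2)) q) := by
    intro s k p q hk hl
    rw [hk, gen, hl]
  rw [show PySem.Str.upper "8" ++ "-" = "8-" from by decide,
      show PySem.Str.upper "P" ++ "-" = "P-" from by decide,
      show PySem.Str.upper "S" ++ "-" = "S-" from by decide,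
      show PySem.Int.toStr 24 ++ "H" = "24H" from by decide,
      show PySem.Int.toStr 72 ++ "H" = "72H" from by decide,
      show PySem.Int.toStr 144 ++ "H" = "144H" from by decide,
      show PySem.Str.len "8" + 1 = (2:Int) from by decide,
      show PySem.Str.len "P" + 1 = (2:Int) from by decide,
      show PySem.Str.len "S" + 1 = (2:Int) from by decide,
      key after "8-24H" "8-" "24H" (by decide) (by decide),
      key after "8-72H" "8-" "72H" (by decide) (by decide),
      key after "8-144H" "8-" "144H" (by decide) (by decide),
      key after "P-24H" "P-" "24H" (by decide) (by decide),
      key after "P-72H" "P-" "72H" (by decide) (by decide),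
      key after "P-144H" "P-" "144H" (by decide) (by decide),
      key after "S-24H" "S-" "24H" (by decide) (by decide),
      key after "S-72H" "S-" "72H" (by decide) (by decide),
      key after "S-144H" "S-" "144H" (by decide) (by decide)]
  generalize PySem.Str.startswith after "0H" = a0
  generalize PySem.Str.startswith after "8-" = c8
  generalize PySem.Str.startswith after "P-" = cP
  generalize PySem.Str.startswith after "S-" = cS
  generalize PySem.Str.startswith (PySem.Str.slice after (some 2)) "24H" = t24
  generalize PySem.Str.startswith (PySem.Str.slice after (some 2)) "72H" = t72
  generalize PySem.Str.startswith (PySem.Str.slice after (some 2)) "144H" = t144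
  cases a0 <;> cases c8 <;> cases cP <;> cases cS <;> cases t24 <;> cases t72 <;> cases t144 <;> rfl

-- ===== VERDICT (by name: the statement is the Claim_ definition above) =====
theorem parse_sample_label_spec : Claim_equal_parse_sample_label := by
  intro g _
  unfold Spec_parse_sample_label parse_sample_label parse_sample_label_alt
  have hup : PySem.Str.upper pslPePrefix = pslPePrefix := by decide
  rw [hup]
  by_cases h : PySem.Str.isIn pslPePrefix (PySem.Str.upper g) = false
  · simp only [h, if_true]
  · simp only [h, psl_body_eq]
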